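-- pv_equiv track=rewrite | github.com/felmhorst/minecraft-ai-model | helpers/generate_block_palette.py | get_property_combinations
-- ===== SOURCE A (Python) =====
-- def get_property_combinations(d):
--
--     def get_dict_without_key(d, key):
--         d_copy = dict(d)
--         d_copy.pop(key, None)
--         return d_copy
--
--     # base case
--     if not d:
--         return ['']
--
--     # this iter
--     key = next(iter(d))
--     values = d[key]
--     part_dict = get_dict_without_key(d, key)
--     part_combinations = get_property_combinations(part_dict)
--     combinations = []
--     for value in values:
--         for combination in part_combinations:
--             if combination == '':
--                 combinations.append(f'{key}={value}')
--             else: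
--                 combinations.append(f'{key}={value},{combination}')
--     return combinations
-- ===== SOURCE B (Python) =====
-- def get_property_combinations(d):
--     combinations = ['']
--     for key, values in d.items():
--         combinations = [f'{c},{key}={v}' if c else f'{key}={v}'
--                         for c in combinations for v in values]
--     return combinations
-- ===== Notes on version B (the rewrite author's own statement) =====
-- stated objective: idiomatic
-- what changed: Replaced the per-key recursion with dict-copy-and-pop (prepending 'key=value' to each suffix combination) by a single left-to-right fold over d.items() that extends an accumulator of prefix strings with a flat comprehension.
import Mathlib
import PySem

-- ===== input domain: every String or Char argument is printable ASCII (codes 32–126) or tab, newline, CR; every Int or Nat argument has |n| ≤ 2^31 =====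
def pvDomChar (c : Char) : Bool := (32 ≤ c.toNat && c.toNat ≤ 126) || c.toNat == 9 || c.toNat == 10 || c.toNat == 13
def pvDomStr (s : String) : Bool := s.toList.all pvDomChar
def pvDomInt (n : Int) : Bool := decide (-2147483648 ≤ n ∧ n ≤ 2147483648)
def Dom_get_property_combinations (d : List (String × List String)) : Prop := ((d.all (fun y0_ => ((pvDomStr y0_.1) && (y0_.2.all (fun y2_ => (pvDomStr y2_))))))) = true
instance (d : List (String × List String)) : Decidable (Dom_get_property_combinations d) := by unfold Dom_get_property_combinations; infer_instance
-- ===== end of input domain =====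

-- B replaces A's per-key recursion (dict copy + pop, prepending to each suffix
-- combination) by one left-to-right fold over the items extending prefix strings;
-- same results, a flatter and more idiomatic pass.

-- ===== PORT A =====
-- A recurses on the dict: take the first key, recurse on the dict without that
-- key (dict copy + pop), and prepend 'key=value' to every partial combination.
def get_property_combinations (d : List (String × List String)) : List String :=
  match d with
  | [] => [""]
  | (key, values) :: rest =>
    -- part_dict = dict(d) with `key` popped (the remaining items, in order)
    let part_combinations := get_property_combinations (rest.filter (fun p => p.1 != key))
    values.flatMap (fun value => part_combinations.map (fun combination =>
      if combination = "" then key ++ "=" ++ value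
      else key ++ "=" ++ value ++ "," ++ combination))
termination_by d.length
decreasing_by
  simpa using le_trans (List.length_filter_le _ _) (le_of_eq List.length_attach)

-- ===== PORT B =====
def get_property_combinations_alt (d : List (String × List String)) : List String :=
  d.foldl (fun combinations kv =>
    combinations.flatMap (fun c => kv.2.map (fun v =>
      if c = "" then kv.1 ++ "=" ++ v else c ++ "," ++ kv.1 ++ "=" ++ v))) [""]

-- ===== PRECONDITION & SPEC =====
-- Pre_ excludes association lists with a duplicate key: the Python A takes a dict,
-- in which duplicate keys collapse (last value wins), so such a list does not
-- represent any input A actually distinguishes.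
def Pre_get_property_combinations (d : List (String × List String)) : Prop :=
  (d.map Prod.fst).Nodup
instance (d : List (String × List String)) : Decidable (Pre_get_property_combinations d) := by unfold Pre_get_property_combinations; infer_instance

def pvWitness_get_property_combinations : (List (String × List String)) :=
  [("a", ["1", "2"]), ("b", ["x"])]

def Spec_get_property_combinations (d : List (String × List String)) (out : List String) : Prop := out = get_property_combinations_alt d
instance (d : List (String × List String)) (out : List String) : Decidable (Spec_get_property_combinations d out) := by unfold Spec_get_property_combinations; infer_instance

-- ===== CLAIM (what is proved, stated in full; the proofs are below) =====
def Claim_equal_get_property_combinations : Prop := ∀ (d : List (String × List String)), Dom_get_property_combinations d → Pre_get_property_combinations d → Spec_get_property_combinations d (get_property_combinations d)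

-- ===== LEMMAS AND PROOFS =====

-- Joining two combination fragments with a comma, skipping empty sides.
def pvGlue (s t : String) : String :=
  if s = "" then t else if t = "" then s else s ++ "," ++ t

theorem pvGlue_empty_left (t : String) : pvGlue "" t = t := by simp [pvGlue]

theorem pvGlue_empty_right (s : String) : pvGlue s "" = s := by
  by_cases hs : s = "" <;> simp [pvGlue, hs]

theorem pv_append_ne_empty (s t : String) (h : s ≠ "") : s ++ t ≠ "" := by
  intro hc
  apply h
  have := congrArg String.toList hc
  simp at this
  exact this.1

theorem pv_kv_ne_empty (k v : String) : k ++ "=" ++ v ≠ "" := by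
  intro hc
  have := congrArg String.toList hc
  simp at this

theorem pvGlue_ne_left (s t : String) (h : s ≠ "") :
    pvGlue s t = if t = "" then s else s ++ "," ++ t := by
  simp [pvGlue, h]

theorem pvGlue_ne_right (s t : String) (h : t ≠ "") :
    pvGlue s t = if s = "" then t else s ++ "," ++ t := by
  by_cases hs : s = "" <;> simp [pvGlue, hs, h]

theorem pvGlue_assoc (a b c : String) :
    pvGlue (pvGlue a b) c = pvGlue a (pvGlue b c) := by
  by_cases ha : a = ""
  · simp [ha, pvGlue_empty_left]
  by_cases hb : b = ""
  · simp [pvGlue, ha, hb]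
  by_cases hc : c = ""
  · simp [pvGlue, ha, hb, hc]
  have hab : a ++ "," ++ b ≠ "" := pv_append_ne_empty _ _ (pv_append_ne_empty _ _ ha)
  have hbc : b ++ "," ++ c ≠ "" := pv_append_ne_empty _ _ (pv_append_ne_empty _ _ hb)
  simp [pvGlue, ha, hb, hc, hab, hbc]
  simp [String.append_assoc]

-- The plain structural-recursion specification both ports meet.
def pvCombos : List (String × List String) → List String
  | [] => [""]
  | (k, vs) :: rest =>
    vs.flatMap (fun v => (pvCombos rest).map (fun t => pvGlue (k ++ "=" ++ v) t))

theorem portA_eq_pvCombos (d : List (String × List String))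
    (h : (d.map Prod.fst).Nodup) : get_property_combinations d = pvCombos d := by
  induction d with
  | nil => rw [get_property_combinations.eq_def]; rfl
  | cons kv rest ih =>
    obtain ⟨k, vs⟩ := kv
    simp only [List.map_cons, List.nodup_cons] at h
    have hfilter : rest.filter (fun p => p.1 != k) = rest := by
      apply List.filter_eq_self.mpr
      intro p hp
      simp only [bne_iff_ne]
      intro hpk
      exact h.1 (by simpa [hpk] using List.mem_map_of_mem (f := Prod.fst) hp)
    have hA : ∀ (v t : String),
        (if t = "" then k ++ "=" ++ v else k ++ "=" ++ v ++ "," ++ t)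
          = pvGlue (k ++ "=" ++ v) t := by
      intro v t
      rw [pvGlue_ne_left _ _ (pv_kv_ne_empty k v)]
    rw [get_property_combinations.eq_def]
    simp only [pvCombos, hfilter, ih h.2, hA]

theorem portB_foldl (d : List (String × List String)) (acc : List String) :
    d.foldl (fun combinations kv =>
      combinations.flatMap (fun c => kv.2.map (fun v =>
        if c = "" then kv.1 ++ "=" ++ v else c ++ "," ++ kv.1 ++ "=" ++ v))) acc
      = acc.flatMap (fun c => (pvCombos d).map (fun t => pvGlue c t)) := by
  induction d generalizing acc with
  | nil =>
    rw [List.foldl_nil, pvCombos]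
    induction acc with
    | nil => rfl
    | cons a l ihacc =>
      rw [List.flatMap_cons, ← ihacc]
      simp [pvGlue_empty_right]
  | cons kv rest ih =>
    obtain ⟨k, vs⟩ := kv
    rw [List.foldl_cons, ih]
    have hstep : ∀ (c v : String),
        (if c = "" then k ++ "=" ++ v else c ++ "," ++ k ++ "=" ++ v)
          = pvGlue c (k ++ "=" ++ v) := by
      intro c v
      rw [pvGlue_ne_right _ _ (pv_kv_ne_empty k v)]
      by_cases hc : c = ""
      · simp [hc]
      · simp only [if_neg hc, String.append_assoc]
    simp only [pvCombos, List.flatMap_assoc, List.map_flatMap, List.flatMap_map,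
      List.map_map, Function.comp_def, hstep, pvGlue_assoc]

theorem portB_eq_pvCombos (d : List (String × List String)) :
    get_property_combinations_alt d = pvCombos d := by
  rw [get_property_combinations_alt, portB_foldl]
  simp [pvGlue_empty_left]

-- ===== VERDICT (by name: the statement is the Claim_ definition above) =====
theorem get_property_combinations_spec : Claim_equal_get_property_combinations := by
  intro d _ hpre
  unfold Spec_get_property_combinations
  rw [portA_eq_pvCombos d hpre, portB_eq_pvCombos]
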